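-- pv_equiv track=rewrite | github.com/google/pytype | pytype/module_utils.py | get_all_prefixes
-- ===== SOURCE A (Python) =====
-- def get_all_prefixes(module_name):
--   """Return all the prefixes of a module name.
--
--   e.g. x.y.z => x, x.y, x.y.z
--
--   Args:
--     module_name: module name
--
--   Returns:
--     List of prefixes
--   """
--   parts = module_name.split(".")
--   name = parts[0]
--   out = [name]
--   for part in parts[1:]:
--     name = ".".join([name, part])
--     out.append(name)
--   return out
-- ===== SOURCE B (Python) =====
-- def get_all_prefixes(module_name):
--   """Return all the prefixes of a module name.
--
--   e.g. x.y.z => x, x.y, x.y.z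
--   """
--   out = [module_name[:i] for i, c in enumerate(module_name) if c == "."]
--   out.append(module_name)
--   return out
-- ===== Notes on version B (the rewrite author's own statement) =====
-- stated objective: alternative
-- what changed: B scans the name once, emitting the slice ending before each dot character, and appends the full name, instead of A splitting into parts and re-joining a growing prefix in a loop.
import Mathlib
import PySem

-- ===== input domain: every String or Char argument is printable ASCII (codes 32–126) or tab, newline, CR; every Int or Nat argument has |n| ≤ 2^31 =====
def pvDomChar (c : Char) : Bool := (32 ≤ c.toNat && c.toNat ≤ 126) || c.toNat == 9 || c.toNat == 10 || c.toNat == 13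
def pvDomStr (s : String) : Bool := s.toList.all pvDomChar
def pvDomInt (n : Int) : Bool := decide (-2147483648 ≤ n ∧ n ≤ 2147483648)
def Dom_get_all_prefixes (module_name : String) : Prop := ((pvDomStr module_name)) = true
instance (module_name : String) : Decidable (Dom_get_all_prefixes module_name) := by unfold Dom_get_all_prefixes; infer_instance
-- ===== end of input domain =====

-- B lists the prefixes by slicing the name at every '.' index found in one scan (plus the full name),
-- instead of A's split-then-rejoin loop; same return value for every input (objective: alternative).


-- ===== PORT A =====
def get_all_prefixes (module_name : String) : List String :=
  let parts := (PySem.Str.split? module_name ".").getD []   -- split? is some: the separator "." is nonempty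
  match PySem.List.pyGet? parts 0 with
  | none => []   -- unreachable: str.split always returns a nonempty list
  | some name =>
    ((PySem.List.slice parts (some 1) none).foldl
      (fun (st : String × List String) part =>
        let n := PySem.Str.join "." [st.1, part]
        (n, st.2 ++ [n]))
      (name, [name])).2

-- ===== PORT B =====
def get_all_prefixes_alt (module_name : String) : List String :=
  ((PySem.List.enumerate module_name.toList 0).filterMap
    (fun p => if p.2 = '.' then some (PySem.Str.slice module_name none (some p.1)) else none))
  ++ [module_name]

-- ===== PRECONDITION & SPEC =====
def Spec_get_all_prefixes (module_name : String) (out : List String) : Prop := out = get_all_prefixes_alt module_name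
instance (module_name : String) (out : List String) : Decidable (Spec_get_all_prefixes module_name out) := by unfold Spec_get_all_prefixes; infer_instance

-- ===== CLAIM (what is proved, stated in full; the proofs are below) =====
def Claim_equal_get_all_prefixes : Prop := ∀ (module_name : String), Dom_get_all_prefixes module_name → Spec_get_all_prefixes module_name (get_all_prefixes module_name)

-- ===== LEMMAS AND PROOFS =====

-- split on '.' at the List Char level: cur is the piece collected so far
def split1 (cur : List Char) : List Char → List (List Char)
  | [] => [cur]
  | c :: rest => if c = '.' then cur :: split1 [] rest else split1 (cur ++ [c]) rest

-- the prefix list A's fold produces from the remaining parts, given the joined name so far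
def prefs (name : List Char) : List (List Char) → List (List Char)
  | [] => []
  | p :: ps => (name ++ '.' :: p) :: prefs (name ++ '.' :: p) ps

-- the common recursion both programs compute: prefixes of acc ++ cs ending at each dot of cs, plus the whole
def go2 (acc : List Char) : List Char → List (List Char)
  | [] => [acc]
  | c :: rest => if c = '.' then acc :: go2 (acc ++ [c]) rest else go2 (acc ++ [c]) rest

lemma split1_nil (cur : List Char) : split1 cur [] = [cur] := rfl
lemma split1_dot (cur rest : List Char) : split1 cur ('.' :: rest) = cur :: split1 [] rest := by
  simp [split1]
lemma split1_char (cur : List Char) {c : Char} (rest : List Char) (hc : c ≠ '.') :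
    split1 cur (c :: rest) = split1 (cur ++ [c]) rest := by
  simp [split1, hc]

lemma splitOn_go_spec : ∀ (fuel : Nat) (l cur : List Char) (acc : List (List Char)), l.length ≤ fuel →
    PySem.Chars.splitOn.go ['.'] fuel l cur acc = acc.reverse ++ split1 cur.reverse l := by
  intro fuel
  induction fuel with
  | zero =>
    intro l cur acc h
    have : l = [] := List.eq_nil_of_length_eq_zero (Nat.le_zero.mp h)
    subst this
    rw [PySem.Chars.splitOn.go.eq_def]
    simp [split1]
  | succ n ih =>
    intro l cur acc h
    cases l with
    | nil =>
      rw [PySem.Chars.splitOn.go.eq_def]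
      simp [split1]
    | cons c rest =>
      by_cases hc : c = '.'
      · subst hc
        rw [PySem.Chars.splitOn.go.eq_def]
        simp only [List.isPrefixOf, BEq.rfl, Bool.and_self, if_true]
        rw [ih _ _ _ (by simpa using Nat.le_of_succ_le_succ h)]
        rw [split1_dot]
        simp only [List.reverse_nil, List.reverse_cons, List.append_assoc, List.singleton_append,
          List.length_cons, List.length_nil, List.drop_succ_cons, List.drop_zero, Nat.zero_add]
      · rw [PySem.Chars.splitOn.go.eq_def]
        simp only []
        rw [if_neg (by simp [List.isPrefixOf]; exact fun h' => hc h'.symm)]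
        rw [ih _ _ _ (by simpa using Nat.le_of_succ_le_succ h)]
        rw [split1_char _ _ hc]
        simp only [List.reverse_cons]

lemma splitOn_eq_split1 (cs : List Char) : PySem.Chars.splitOn cs ['.'] = split1 [] cs := by
  unfold PySem.Chars.splitOn
  rw [splitOn_go_spec _ _ _ _ (by omega)]
  simp

lemma split1_ne_nil (cur cs : List Char) : split1 cur cs ≠ [] := by
  induction cs generalizing cur with
  | nil => simp [split1]
  | cons c rest ih =>
    by_cases hc : c = '.' <;> simp [split1, hc, ih]

lemma prefs_cons (name p : List Char) (ps : List (List Char)) :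
    prefs name (p :: ps) = (name ++ '.' :: p) :: prefs (name ++ '.' :: p) ps := rfl
lemma go2_nil (acc : List Char) : go2 acc [] = [acc] := rfl
lemma go2_dot (acc rest : List Char) : go2 acc ('.' :: rest) = acc :: go2 (acc ++ ['.']) rest := by
  simp [go2]
lemma go2_char (acc : List Char) {c : Char} (rest : List Char) (hc : c ≠ '.') :
    go2 acc (c :: rest) = go2 (acc ++ [c]) rest := by
  simp [go2, hc]

-- A's fold, characterised: it appends prefs of the remaining parts
lemma foldA_spec (ps : List (List Char)) : ∀ (name : List Char) (out : List (List Char)),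
    (ps.foldl (fun (st : List Char × List (List Char)) p =>
        (st.1 ++ '.' :: p, st.2 ++ [st.1 ++ '.' :: p])) (name, out)).2
      = out ++ prefs name ps := by
  induction ps with
  | nil => intro name out; simp [prefs]
  | cons p ps ih => intro name out; simp [List.foldl_cons, ih, prefs_cons]

lemma prefs_split1_eq_go2 (cs : List Char) : ∀ (name cur : List Char),
    prefs name (split1 cur cs) = go2 (name ++ '.' :: cur) cs := by
  induction cs with
  | nil => intro name cur; rw [split1_nil, prefs_cons, go2_nil]; rfl
  | cons c rest ih =>
    intro name cur
    by_cases hc : c = '.'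
    · subst hc
      rw [split1_dot, prefs_cons, go2_dot, ih]
    · rw [split1_char _ _ hc, go2_char _ _ hc, ih]
      simp

lemma head_prefs_split1_eq_go2 (cs : List Char) : ∀ (cur : List Char),
    (match split1 cur cs with
     | [] => ([] : List (List Char))
     | n :: rest => n :: prefs n rest) = go2 cur cs := by
  induction cs with
  | nil => intro cur; rw [split1_nil, go2_nil]; rfl
  | cons c rest ih =>
    intro cur
    by_cases hc : c = '.'
    · subst hc
      rw [split1_dot, go2_dot]
      show cur :: prefs cur (split1 [] rest) = cur :: go2 (cur ++ ['.']) rest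
      have h := prefs_split1_eq_go2 rest cur []
      simpa using h
    · rw [split1_char _ _ hc, go2_char _ _ hc]
      exact ih (cur ++ [c])

-- B's filterMap over enumerate, characterised against go2
lemma filterMap_enumerate_go2 (full : List Char) : ∀ (cs : List Char) (k : Nat),
    full.drop k = cs → k ≤ full.length →
    ((PySem.List.enumerate cs (k : Int)).filterMap
        (fun p => if p.2 = '.' then some (PySem.List.slice full none (some p.1)) else none)) ++ [full]
      = go2 (full.take k) cs := by
  intro cs
  induction cs with
  | nil =>
    intro k hdrop hk
    have hlen : full.length - k = 0 := by simpa using congrArg List.length hdrop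
    have hk' : k = full.length := by omega
    subst hk'
    simp [PySem.List.enumerate_nil, go2_nil]
  | cons c rest ih =>
    intro k hdrop hk
    have hklt : k < full.length := by
      by_contra hge
      have h0 : full.drop k = [] := List.drop_eq_nil_of_le (by omega)
      rw [h0] at hdrop
      exact List.cons_ne_nil c rest hdrop.symm
    have hget : full[k]'hklt = c := by
      have h0 : (full.drop k)[0]'(by rw [hdrop]; simp) = c := by
        simp [hdrop]
      rw [List.getElem_drop] at h0
      simpa using h0
    have hrest : full.drop (k + 1) = rest := by
      have h1 : full.drop (k + 1) = (full.drop k).drop 1 := by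
        rw [List.drop_drop]
      rw [h1, hdrop]
      rfl
    have htake : full.take (k + 1) = full.take k ++ [c] := by
      rw [← hget]
      exact (List.take_append_getElem hklt).symm
    rw [PySem.List.enumerate_cons]
    have ihs := ih (k + 1) hrest (by omega)
    have hcast : ((k : Int) + 1) = ((k + 1 : Nat) : Int) := by push_cast; ring
    by_cases hc : c = '.'
    · subst hc
      rw [List.filterMap_cons]
      have hif : (if ((k : Int), ('.' : Char)).2 = '.'
          then some (PySem.List.slice full none (some ((k : Int), ('.' : Char)).1)) else none)
          = some (full.take k) := by simp [PySem.List.slice_to_natCast]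
      rw [hif]
      simp only []
      rw [List.cons_append, hcast, ihs, go2_dot, htake]
    · rw [List.filterMap_cons]
      have hif : (if ((k : Int), c).2 = '.'
          then some (PySem.List.slice full none (some ((k : Int), c).1)) else none) = none := by
        simp [hc]
      rw [hif]
      simp only []
      rw [hcast, ihs, go2_char _ _ hc, htake]

-- push String.toList through A's fold
lemma foldA_toList (ps : List String) : ∀ (name : String) (out : List String),
    ((ps.foldl (fun (st : String × List String) part =>
        (PySem.Str.join "." [st.1, part], st.2 ++ [PySem.Str.join "." [st.1, part]]))
      (name, out)).2).map String.toList
    = ((ps.map String.toList).foldl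
        (fun (st : List Char × List (List Char)) p =>
          (st.1 ++ '.' :: p, st.2 ++ [st.1 ++ '.' :: p]))
        (name.toList, out.map String.toList)).2 := by
  induction ps with
  | nil => intro name out; simp
  | cons p ps ih =>
    intro name out
    have hj : PySem.Chars.join ['.'] [name.toList, p.toList] = name.toList ++ '.' :: p.toList := by
      simp [PySem.Chars.join, List.intercalate, List.intersperse]
    have hs : (PySem.Str.join "." [name, p]).toList = name.toList ++ '.' :: p.toList := by
      rw [PySem.Str.toList_join]
      simpa using hj
    rw [List.foldl_cons, List.map_cons, List.foldl_cons, ih]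
    simp only [List.map_append, List.map_cons, List.map_nil, hs]

lemma map_toList_inj (l1 l2 : List String)
    (h : l1.map String.toList = l2.map String.toList) : l1 = l2 :=
  (List.map_injective_iff.mpr (fun _ _ hs => String.toList_inj.mp hs)) h

-- ===== VERDICT (by name: the statement is the Claim_ definition above) =====
theorem get_all_prefixes_spec : Claim_equal_get_all_prefixes := by
  intro m _
  unfold Spec_get_all_prefixes
  apply map_toList_inj
  -- the split, pulled down to the List Char level
  have hsplit : PySem.Str.split? m "." = some ((split1 [] m.toList).map String.ofList) := by
    have hb := PySem.Str.split?_map m "."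
    have hc : PySem.Chars.split? m.toList ".".toList = some (PySem.Chars.splitOn m.toList ['.']) := by
      simp [PySem.Chars.split?]
    rw [hc] at hb
    cases he : PySem.Str.split? m "." with
    | none => rw [he] at hb; exact absurd hb (by simp)
    | some ps =>
      rw [he] at hb
      simp only [Option.map_some, Option.some.injEq] at hb
      congr 1
      apply map_toList_inj
      rw [hb, splitOn_eq_split1]
      simp [List.map_map, Function.comp_def]
  -- B's side, pulled down to the List Char level
  have hB : (get_all_prefixes_alt m).map String.toList
      = ((PySem.List.enumerate m.toList 0).filterMap
          (fun p => if p.2 = '.' then some (PySem.List.slice m.toList none (some p.1)) else none))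
        ++ [m.toList] := by
    unfold get_all_prefixes_alt
    simp [List.map_filterMap, apply_ite]
  cases hs : split1 [] m.toList with
  | nil => exact absurd hs (split1_ne_nil [] m.toList)
  | cons n rest =>
    rw [hs] at hsplit
    unfold get_all_prefixes
    rw [hsplit]
    simp only [Option.getD_some, List.map_cons]
    have h0 : PySem.List.pyGet? (String.ofList n :: rest.map String.ofList) 0
        = some (String.ofList n) := by
      simp [PySem.List.pyGet?, PySem.List.pyIdx?]
    rw [h0]
    simp only []
    rw [PySem.List.slice_from_one]
    simp only [List.tail_cons]
    rw [foldA_toList, foldA_spec]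
    have hmaps : (rest.map String.ofList).map String.toList = rest := by
      simp [List.map_map, Function.comp_def]
    rw [hmaps]
    have hh : n :: prefs n rest = go2 [] m.toList := by
      have h := head_prefs_split1_eq_go2 m.toList []
      rw [hs] at h
      exact h
    have hF := filterMap_enumerate_go2 m.toList m.toList 0 (by simp) (by simp)
    rw [hB]
    simp only [Nat.cast_zero] at hF
    rw [hF, List.take_zero]
    simp only [List.map_cons, List.map_nil]
    -- (String.ofList n).toList = n
    simpa using hh
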